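-- pv_equiv track=rewrite | github.com/kenota/hr | swap-nodes-algo/solution.py | iter_walk2
-- ===== SOURCE A (Python) =====
-- def iter_walk2(tree, q):
--     stack = []
--     res = []
--     node = (1, 1)
--     while node[0] != -1 or len(stack) > 0:
--
--         if node[0] != -1:
--             idx = node[0] - 1
--             if node[1] % q == 0:
--                 tree[idx][0], tree[idx][1] = tree[idx][1], tree[idx][0]
--             stack.append(node)
--             node = (tree[node[0] - 1][0], node[1]+1)
--         else:
--             node = stack.pop()
--             res.append(node[0])
--             node = (tree[node[0] - 1][1], node[1]+1)
--     return res
-- ===== SOURCE B (Python) =====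
-- # B: recursive in-order traversal with depth-based swap, replacing A's explicit-stack loop.
-- # Like A, it mutates `tree` in place (swapping children of visited nodes); the equivalence is about the return value.
-- def iter_walk2(tree, q):
--     res = []
--
--     def go(idx, depth):
--         if idx == -1:
--             return
--         row = tree[idx - 1]
--         if depth % q == 0:
--             row[0], row[1] = row[1], row[0]
--         go(row[0], depth + 1)
--         res.append(idx)
--         go(row[1], depth + 1)
--
--     go(1, 1)
--     return res
-- ===== Notes on version B (the rewrite author's own statement) =====
-- stated objective: simpler
-- what changed: Replaces A's iterative explicit-stack walk (a while loop over a (node,depth) stack with separate push/pop phases) by a direct recursive in-order traversal helper go(idx, depth) that swaps at the node, recurses left, appends, recurses right.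
-- outside the precondition, e.g. on iter_walk2([[2, 3], [-1, -1], [2, -1]], 2): A returns [2, 1, 3, 2], B returns [2, 1, 3, 2]; on iter_walk2([[0, -1], [-1, -1]], 2): A returns [0, 1], B returns [0, 1]
import Mathlib
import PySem

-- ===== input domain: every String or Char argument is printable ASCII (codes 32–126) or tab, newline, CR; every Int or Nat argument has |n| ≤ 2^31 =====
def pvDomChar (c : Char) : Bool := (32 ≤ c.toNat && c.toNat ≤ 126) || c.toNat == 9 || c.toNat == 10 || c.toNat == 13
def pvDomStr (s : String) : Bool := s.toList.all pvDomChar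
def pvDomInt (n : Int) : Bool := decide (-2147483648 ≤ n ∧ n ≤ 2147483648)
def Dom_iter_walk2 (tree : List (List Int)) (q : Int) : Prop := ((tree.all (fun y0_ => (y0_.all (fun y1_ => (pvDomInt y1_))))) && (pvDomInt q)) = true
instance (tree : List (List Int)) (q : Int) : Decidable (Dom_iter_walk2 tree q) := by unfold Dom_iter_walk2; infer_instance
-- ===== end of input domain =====

-- B replaces A's explicit-stack iterative walk by a direct recursive in-order traversal (simpler);
-- like A, the Python B mutates `tree` in place (child swaps); the equivalence proved is about the return value.

-- ===== PORT A =====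
-- A's while loop, fuel-totalized (fuel is a termination guard only; 2^(len+2) steps are proved
-- sufficient under Pre_).  Branches returning early correspond to Python raising (unreachable under Pre_).
def loopA (q : Int) : Nat → List (List Int) → List (Int × Int) → Int × Int → List Int → List Int
  | 0, _, _, _, res => res                        -- fuel exhausted (unreachable under Pre_)
  | fuel+1, tree, stack, (c, d), res =>
    if c ≠ -1 then
      -- if node[1] % q == 0: swap tree[idx][0], tree[idx][1]
      match PySem.Int.mod? d q with
      | none => res                               -- q = 0: ZeroDivisionError (excluded by Pre_)
      | some m =>
        match PySem.List.pyGet? tree (c - 1) with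
        | none => res                             -- IndexError (excluded by Pre_)
        | some row =>
          match row with
          | a :: b :: rest =>
            let tree' := if m = 0 then PySem.List.pySetD tree (c - 1) (b :: a :: rest) else tree
            -- node = (tree[node[0]-1][0], node[1]+1): re-read the (possibly swapped) row
            match PySem.List.pyGet? tree' (c - 1) with
            | none => res
            | some row' =>
              match PySem.List.pyGet? row' 0 with
              | none => res
              | some x => loopA q fuel tree' ((c, d) :: stack) (x, d + 1) res
          | _ => res                              -- row shorter than 2: IndexError (excluded by Pre_)
    else
      match stack with
      | [] => res                                 -- loop condition false: return res
      | (v, dv) :: s =>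
        let res' := res ++ [v]                    -- res.append(node[0])
        match PySem.List.pyGet? tree (v - 1) with
        | none => res'                            -- IndexError (excluded by Pre_)
        | some row =>
          match PySem.List.pyGet? row 1 with
          | none => res'
          | some y => loopA q fuel tree s (y, dv + 1) res'

def iter_walk2 (tree : List (List Int)) (q : Int) : List Int :=
  loopA q (2 ^ (tree.length + 2)) tree [] (1, 1) []

-- ===== PORT B =====
-- B's recursive helper go(idx, depth), fuel-totalized (len+2 levels are proved sufficient under
-- Pre_); it threads the mutated tree and returns the in-order list of its subtree.
def goB (q : Int) : Nat → List (List Int) → Int → Int → List (List Int) × List Int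
  | 0, tree, _, _ => (tree, [])                   -- fuel exhausted (unreachable under Pre_)
  | fuel+1, tree, idx, d =>
    if idx = -1 then (tree, [])
    else
      match PySem.List.pyGet? tree (idx - 1) with
      | none => (tree, [])                        -- IndexError (excluded by Pre_)
      | some row =>
        match row with
        | a :: b :: rest =>
          match PySem.Int.mod? d q with
          | none => (tree, [])                    -- q = 0: ZeroDivisionError (excluded by Pre_)
          | some m =>
            let x := if m = 0 then b else a       -- row[0] after the (possible) swap
            let y := if m = 0 then a else b       -- row[1] after the (possible) swap
            let tree1 := if m = 0 then PySem.List.pySetD tree (idx - 1) (b :: a :: rest) else tree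
            let r1 := goB q fuel tree1 x (d + 1)  -- go(row[0], depth+1)
            let r2 := goB q fuel r1.1 y (d + 1)   -- go(row[1], depth+1), after res.append(idx)
            (r2.1, r1.2 ++ idx :: r2.2)
        | _ => (tree, [])                         -- row shorter than 2: IndexError (excluded by Pre_)

def iter_walk2_alt (tree : List (List Int)) (q : Int) : List Int :=
  (goB q (tree.length + 2) tree 1 1).2

-- ===== PRECONDITION & SPEC =====
def RowOK (n i : Nat) (row : List Int) : Prop :=
  2 ≤ row.length ∧ ∀ c ∈ row.take 2, c = -1 ∨ ((i : Int) + 1 < c ∧ c ≤ (n : Int))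

-- 0-based indices of the rows the (1-based) children of row i point at
def kids (t : List (List Int)) (i : Nat) : List Nat :=
  ((t.getD i []).take 2).filterMap
    (fun c => if 1 ≤ c ∧ c ≤ (t.length : Int) then some (c - 1).toNat else none)

-- graph closure of {root} under the child edges, one ascending pass (enough for forward edges)
def reachAux (t : List (List Int)) : Nat → List Nat
  | 0 => [0]
  | k + 1 => if k ∈ reachAux t k then reachAux t k ++ kids t k else reachAux t k

def reach (t : List (List Int)) : List Nat := reachAux t t.length

-- Pre_ admits inputs where q ≠ 0 and every row REACHABLE from the root is well formed (≥ 2 entries,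
-- children -1 or strictly larger in-range indices); it excludes degenerate inputs (q = 0, reachable
-- backward edges, 0 or out-of-range reachable children) on some of which A still happens to return
-- via Python's negative-index wraparound or a luckily terminating cyclic walk.
def Pre_iter_walk2 (tree : List (List Int)) (q : Int) : Prop :=
  q ≠ 0 ∧ tree ≠ [] ∧ ∀ i ∈ reach tree, RowOK tree.length i (tree.getD i [])

instance (tree : List (List Int)) (q : Int) : Decidable (Pre_iter_walk2 tree q) := by
  unfold Pre_iter_walk2 RowOK; infer_instance

def pvWitness_iter_walk2 : List (List Int) × Int := ([[2, 3], [-1, -1], [-1, -1]], 2)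

def Spec_iter_walk2 (tree : List (List Int)) (q : Int) (out : List Int) : Prop := out = iter_walk2_alt tree q
instance (tree : List (List Int)) (q : Int) (out : List Int) : Decidable (Spec_iter_walk2 tree q out) := by unfold Spec_iter_walk2; infer_instance

-- ===== CLAIM (what is proved, stated in full; the proofs are below) =====
def Claim_equal_iter_walk2 : Prop := ∀ (tree : List (List Int)) (q : Int), Dom_iter_walk2 tree q → Pre_iter_walk2 tree q → Spec_iter_walk2 tree q (iter_walk2 tree q)

-- ===== LEMMAS AND PROOFS =====
-- "the subtree rooted at idx is a well-formed forward tree" (f bounds its depth); proof-side notion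
def SubF : Nat → List (List Int) → Int → Prop
  | 0, _, idx => idx = -1
  | f + 1, t, idx => idx = -1 ∨
      (1 ≤ idx ∧ idx ≤ (t.length : Int) ∧
        ∃ a b rest, t.getD (idx - 1).toNat [] = a :: b :: rest ∧
          (a = -1 ∨ idx < a) ∧ (b = -1 ∨ idx < b) ∧ SubF f t a ∧ SubF f t b)

-- a row is unchanged or has had its first two entries swapped
def RowSim (r r' : List Int) : Prop :=
  r' = r ∨ ∃ a b rest, r = a :: b :: rest ∧ r' = b :: a :: rest

-- trees related by per-row swaps
def TSim (t t' : List (List Int)) : Prop :=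
  t'.length = t.length ∧ ∀ i : Nat, RowSim (t.getD i []) (t'.getD i [])

lemma TSim_refl (t : List (List Int)) : TSim t t := ⟨rfl, fun _ => Or.inl rfl⟩

lemma RowSim_trans {r r' r'' : List Int} (h1 : RowSim r r') (h2 : RowSim r' r'') :
    RowSim r r'' := by
  rcases h1 with rfl | ⟨a, b, rest, h1a, rfl⟩
  · exact h2
  · rcases h2 with rfl | ⟨a2, b2, rest2, h2a, rfl⟩
    · exact Or.inr ⟨a, b, rest, h1a, rfl⟩
    · obtain ⟨rfl, rfl, rfl⟩ : a2 = b ∧ b2 = a ∧ rest2 = rest := by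
        injection h2a with e1 e2; injection e2 with e2 e3; exact ⟨e1.symm, e2.symm, e3.symm⟩
      exact Or.inl (by rw [h1a])

lemma TSim_trans {t t' t'' : List (List Int)} (h1 : TSim t t') (h2 : TSim t' t'') :
    TSim t t'' :=
  ⟨h2.1.trans h1.1, fun i => RowSim_trans (h1.2 i) (h2.2 i)⟩


-- plumbing: the in-range row lookup / row update used by both ports
lemma pyGet_row (t : List (List Int)) (idx : Int) (h : 1 ≤ idx)
    (hi : (idx - 1).toNat < t.length) :
    PySem.List.pyGet? t (idx - 1) = some (t.getD (idx - 1).toNat []) := by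
  rw [PySem.List.pyGet?_of_nonneg t (by omega : (0:Int) ≤ idx - 1),
    List.getElem?_eq_getElem hi, List.getD_eq_getElem _ _ hi]

lemma pyGet_one (a b : Int) (r : List Int) : PySem.List.pyGet? (a :: b :: r) 1 = some b := by
  simp [PySem.List.pyGet?, PySem.List.pyIdx?]

lemma getD_set_self (t : List (List Int)) (i : Nat) (hi : i < t.length) (v : List Int) :
    (t.set i v).getD i [] = v := by
  simp [List.getD_eq_getElem?_getD, List.getElem?_set_self (by simpa using hi)]

lemma getD_set_ne (t : List (List Int)) (i j : Nat) (hne : j ≠ i) (v : List Int) :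
    (t.set i v).getD j [] = t.getD j [] := by
  simp [List.getD_eq_getElem?_getD, List.getElem?_set_ne (by omega : i ≠ j)]

lemma TSim_swap (t : List (List Int)) (i : Nat) (a b : Int) (rest : List Int)
    (hi : i < t.length) (hrow : t.getD i [] = a :: b :: rest) :
    TSim t (t.set i (b :: a :: rest)) := by
  refine ⟨by simp, fun j => ?_⟩
  by_cases hji : j = i
  · subst hji
    rw [getD_set_self t j hi]
    exact Or.inr ⟨a, b, rest, hrow, rfl⟩
  · rw [getD_set_ne t i j hji]
    exact Or.inl rfl

lemma SubF_le : ∀ (f : Nat) (t : List (List Int)) (idx : Int),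
    SubF f t idx → idx = -1 ∨ (1 ≤ idx ∧ idx ≤ (t.length : Int)) := by
  intro f t idx h
  cases f with
  | zero => exact Or.inl h
  | succ f =>
    rcases h with h | ⟨h1, h2, _⟩
    · exact Or.inl h
    · exact Or.inr ⟨h1, h2⟩

lemma SubF_TSim : ∀ (f : Nat) (t t' : List (List Int)) (idx : Int),
    TSim t t' → SubF f t idx → SubF f t' idx := by
  intro f
  induction f with
  | zero => intro t t' idx _ h; exact h
  | succ f ih =>
    intro t t' idx hsim h
    rcases h with h | ⟨h1, h2, a, b, rest, hrow, hca, hcb, hsa, hsb⟩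
    · exact Or.inl h
    right
    refine ⟨h1, by rw [hsim.1]; exact h2, ?_⟩
    rcases hsim.2 (idx - 1).toNat with he | ⟨a0, b0, rest0, h0, h0'⟩
    · exact ⟨a, b, rest, by rw [he, hrow], hca, hcb, ih t t' a hsim hsa, ih t t' b hsim hsb⟩
    · rw [hrow] at h0
      obtain ⟨rfl, rfl, rfl⟩ : a = a0 ∧ b = b0 ∧ rest = rest0 := by
        injection h0 with e1 e2; injection e2 with e2 e3; exact ⟨e1, e2, e3⟩
      exact ⟨b, a, rest, h0', hcb, hca, ih t t' b hsim hsb, ih t t' a hsim hsa⟩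
lemma goB_neg_one (q : Int) (fuel : Nat) (t : List (List Int)) (d : Int) :
    goB q fuel t (-1) d = (t, []) := by cases fuel <;> simp [goB]

-- one unfolding step of goB at a valid node
lemma goB_succ (q : Int) (fuel : Nat) (t : List (List Int)) (idx d : Int)
    (h1 : 1 ≤ idx) (hi : (idx - 1).toNat < t.length)
    (a b : Int) (rest : List Int) (hrow : t.getD (idx - 1).toNat [] = a :: b :: rest)
    (m : Int) (hm : PySem.Int.mod? d q = some m) :
    goB q (fuel + 1) t idx d =
      (let t1 := if m = 0 then t.set (idx - 1).toNat (b :: a :: rest) else t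
       let x := if m = 0 then b else a
       let y := if m = 0 then a else b
       let r1 := goB q fuel t1 x (d + 1)
       let r2 := goB q fuel r1.1 y (d + 1)
       (r2.1, r1.2 ++ idx :: r2.2)) := by
  simp only [goB, pyGet_row t idx h1 hi, hrow, hm,
    PySem.List.pySetD_of_nonneg t _ (by omega : (0:Int) ≤ idx - 1),
    if_neg (by omega : ¬ idx = -1)]

-- when q = 0 (Python raises ZeroDivisionError) goB leaves everything unchanged
lemma goB_none_mod (q : Int) (fuel : Nat) (t : List (List Int)) (idx d : Int)
    (hm : PySem.Int.mod? d q = none) :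
    goB q (fuel + 1) t idx d = (t, []) := by
  simp only [goB, hm]
  split
  · rfl
  split
  · rfl
  split <;> rfl

-- one push step of A's loop at a valid node
lemma loopA_push (q : Int) (fuel : Nat) (t : List (List Int)) (stack : List (Int × Int))
    (c d : Int) (res : List Int) (h1 : 1 ≤ c) (hi : (c - 1).toNat < t.length)
    (a b : Int) (rest : List Int) (hrow : t.getD (c - 1).toNat [] = a :: b :: rest)
    (m : Int) (hm : PySem.Int.mod? d q = some m) :
    loopA q (fuel + 1) t stack (c, d) res =
      loopA q fuel (if m = 0 then t.set (c - 1).toNat (b :: a :: rest) else t)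
        ((c, d) :: stack) ((if m = 0 then b else a), d + 1) res := by
  have hc : c ≠ -1 := by omega
  by_cases hm0 : m = 0
  · subst hm0
    have hg : PySem.List.pyGet? (t.set (c - 1).toNat (b :: a :: rest)) (c - 1)
        = some (b :: a :: rest) := by
      rw [pyGet_row _ c h1 (by simpa using hi), getD_set_self t _ hi]
    simp only [loopA, if_pos hc, hm, pyGet_row t c h1 hi, hrow,
      PySem.List.pySetD_of_nonneg t _ (by omega : (0:Int) ≤ c - 1), reduceIte,
      hg, PySem.List.pyGet?_zero_cons]
  · simp only [loopA, if_pos hc, hm, if_neg hm0, pyGet_row t c h1 hi, hrow,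
      PySem.List.pyGet?_zero_cons]

-- one pop step of A's loop
lemma loopA_pop (q : Int) (fuel : Nat) (t : List (List Int)) (stack : List (Int × Int))
    (v dv d : Int) (res : List Int) (h1 : 1 ≤ v) (hi : (v - 1).toNat < t.length)
    (a b : Int) (rest : List Int) (hrow : t.getD (v - 1).toNat [] = a :: b :: rest) :
    loopA q (fuel + 1) t ((v, dv) :: stack) (-1, d) res =
      loopA q fuel t stack (b, dv + 1) (res ++ [v]) := by
  simp only [loopA, if_neg (by simp : ¬ (-1 : Int) ≠ -1), pyGet_row t v h1 hi, hrow, pyGet_one]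

lemma loopA_exit (q : Int) (fuel : Nat) (t : List (List Int)) (d : Int) (res : List Int) :
    loopA q (fuel + 1) t [] (-1, d) res = res := by
  simp [loopA]

-- combined facts about goB on a valid subtree: it only swaps rows, never touches rows strictly
-- below the root of the subtree, and produces a list short enough for loopA's fuel
lemma goB_props (q : Int) (n : Nat) :
    ∀ (fuel : Nat) (t : List (List Int)) (idx d : Int), t.length = n → SubF fuel t idx →
      TSim t (goB q fuel t idx d).1 ∧
      (∀ j : Nat, (j : Int) + 1 < idx → ((goB q fuel t idx d).1).getD j [] = t.getD j []) ∧
      (goB q fuel t idx d).2.length + 1 ≤ 2 ^ (n + 2 - idx.toNat) := by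
  intro fuel
  induction fuel with
  | zero =>
    intro t idx d _ _
    exact ⟨TSim_refl t, fun _ _ => rfl, Nat.one_le_two_pow⟩
  | succ f ih =>
    intro t idx d hlen hs
    rcases hs with h | ⟨h1, h2, a, b, rest, hrow, hca, hcb, hsa, hsb⟩
    · subst h
      rw [goB_neg_one]
      exact ⟨TSim_refl t, fun _ _ => rfl, Nat.one_le_two_pow⟩
    have hi : (idx - 1).toNat < t.length := by omega
    rcases hmod : PySem.Int.mod? d q with _ | m
    · rw [goB_none_mod q f t idx d hmod]
      exact ⟨TSim_refl t, fun _ _ => rfl, Nat.one_le_two_pow⟩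
    rw [goB_succ q f t idx d h1 hi a b rest hrow m hmod]
    simp only []
    set i : Nat := (idx - 1).toNat with hidef
    set t1 := if m = 0 then t.set i (b :: a :: rest) else t with ht1
    set x : Int := if m = 0 then b else a with hx
    set y : Int := if m = 0 then a else b with hy
    have hsim1 : TSim t t1 := by
      rw [ht1]; split
      · exact TSim_swap t i a b rest hi hrow
      · exact TSim_refl t
    have hlen1 : t1.length = n := by rw [hsim1.1, hlen]
    have hsx : SubF f t1 x := by
      rw [hx]; split
      · exact SubF_TSim f t t1 b hsim1 hsb
      · exact SubF_TSim f t t1 a hsim1 hsa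
    have hsy : SubF f t1 y := by
      rw [hy]; split
      · exact SubF_TSim f t t1 a hsim1 hsa
      · exact SubF_TSim f t t1 b hsim1 hsb
    have hxc : x = -1 ∨ (idx < x ∧ x ≤ (n : Int)) := by
      rcases SubF_le f t1 x hsx with h | ⟨hx1, hx2⟩
      · exact Or.inl h
      · right
        refine ⟨?_, by omega⟩
        rw [hx]; rcases hca with h | h <;> rcases hcb with h' | h' <;> split <;> omega
    have hyc : y = -1 ∨ (idx < y ∧ y ≤ (n : Int)) := by
      rcases SubF_le f t1 y hsy with h | ⟨hy1, hy2⟩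
      · exact Or.inl h
      · right
        refine ⟨?_, by omega⟩
        rw [hy]; rcases hca with h | h <;> rcases hcb with h' | h' <;> split <;> omega
    obtain ⟨hsim2, hfr1, hb1⟩ := ih t1 x (d + 1) hlen1 hsx
    set r1 := goB q f t1 x (d + 1) with hr1
    have hlen2 : r1.1.length = n := by rw [hsim2.1, hlen1]
    have hsy2 : SubF f r1.1 y := SubF_TSim f t1 r1.1 y hsim2 hsy
    obtain ⟨hsim3, hfr2, hb2⟩ := ih r1.1 y (d + 1) hlen2 hsy2
    set r2 := goB q f r1.1 y (d + 1) with hr2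
    refine ⟨TSim_trans (TSim_trans hsim1 hsim2) hsim3, ?_, ?_⟩
    · intro j hj
      have hji : j ≠ i := by omega
      have e2 : r2.1.getD j [] = r1.1.getD j [] := by
        rcases hyc with h | ⟨h', _⟩
        · rw [hr2, h, goB_neg_one]
        · exact hfr2 j (by omega)
      have e1 : r1.1.getD j [] = t1.getD j [] := by
        rcases hxc with h | ⟨h', _⟩
        · rw [hr1, h, goB_neg_one]
        · exact hfr1 j (by omega)
      have e0 : t1.getD j [] = t.getD j [] := by
        rw [ht1]; split
        · exact getD_set_ne t i j hji _
        · rfl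
      rw [e2, e1, e0]
    · have hxb : r1.2.length + 1 ≤ 2 ^ (n + 1 - idx.toNat) := by
        rcases hxc with h | ⟨h', h''⟩
        · rw [hr1, h, goB_neg_one]; exact Nat.one_le_two_pow
        · refine le_trans hb1 (Nat.pow_le_pow_right (by norm_num) ?_)
          omega
      have hyb : r2.2.length + 1 ≤ 2 ^ (n + 1 - idx.toNat) := by
        rcases hyc with h | ⟨h', h''⟩
        · rw [hr2, h, goB_neg_one]; exact Nat.one_le_two_pow
        · refine le_trans hb2 (Nat.pow_le_pow_right (by norm_num) ?_)
          omega
      have hexp : 2 ^ (n + 2 - idx.toNat) = 2 ^ (n + 1 - idx.toNat) + 2 ^ (n + 1 - idx.toNat) := by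
        have h2' : idx.toNat ≤ n + 1 := by omega
        have : n + 2 - idx.toNat = (n + 1 - idx.toNat) + 1 := by omega
        rw [this, pow_succ]; ring
      simp only [List.length_append, List.length_cons]
      omega
-- the stack-elimination simulation: running A's loop on a valid subtree equals goB then continuing
lemma loopA_goB (q : Int) (n : Nat) (hq : q ≠ 0) :
    ∀ (fuel : Nat) (t : List (List Int)) (idx d : Int)
      (stack : List (Int × Int)) (res : List Int) (k : Nat),
      t.length = n → SubF fuel t idx →
      ∃ d', loopA q (2 * (goB q fuel t idx d).2.length + k) t stack (idx, d) res
          = loopA q k (goB q fuel t idx d).1 stack (-1, d') (res ++ (goB q fuel t idx d).2) := by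
  intro fuel
  induction fuel with
  | zero =>
    intro t idx d stack res k _ hs
    rw [hs]
    exact ⟨d, by simp [goB]⟩
  | succ f ih =>
    intro t idx d stack res k hlen hs
    rcases hs with h | ⟨h1, h2, a, b, rest, hrow, hca, hcb, hsa, hsb⟩
    · subst h
      exact ⟨d, by rw [goB_neg_one]; simp⟩
    have hi : (idx - 1).toNat < t.length := by omega
    have hm : PySem.Int.mod? d q = some (PySem.Int.mod d q) := by
      simp [PySem.Int.mod?, PySem.Int.mod, hq]
    set m : Int := PySem.Int.mod d q with hmdef
    rw [goB_succ q f t idx d h1 hi a b rest hrow m hm]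
    simp only []
    set i : Nat := (idx - 1).toNat with hidef
    set t1 := if m = 0 then t.set i (b :: a :: rest) else t with ht1
    set x : Int := if m = 0 then b else a with hx
    set y : Int := if m = 0 then a else b with hy
    have hsim1 : TSim t t1 := by
      rw [ht1]; split
      · exact TSim_swap t i a b rest hi hrow
      · exact TSim_refl t
    have hlen1 : t1.length = n := by rw [hsim1.1, hlen]
    have hsx : SubF f t1 x := by
      rw [hx]; split
      · exact SubF_TSim f t t1 b hsim1 hsb
      · exact SubF_TSim f t t1 a hsim1 hsa
    have hsy : SubF f t1 y := by
      rw [hy]; split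
      · exact SubF_TSim f t t1 a hsim1 hsa
      · exact SubF_TSim f t t1 b hsim1 hsb
    have hxc : x = -1 ∨ idx < x := by
      rw [hx]; rcases hca with h | h <;> rcases hcb with h' | h' <;> split <;> omega
    obtain ⟨hsim2, hfr1, _⟩ := goB_props q n f t1 x (d + 1) hlen1 hsx
    set r1 := goB q f t1 x (d + 1) with hr1
    set r2 := goB q f r1.1 y (d + 1) with hr2
    have hfe : 2 * (r1.2 ++ idx :: r2.2).length + k
        = (2 * r1.2.length + (2 * r2.2.length + k + 1)) + 1 := by
      simp [List.length_append]; omega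
    rw [hfe, loopA_push q _ t stack idx d res h1 hi a b rest hrow m hm]
    rw [show (if m = 0 then t.set (idx - 1).toNat (b :: a :: rest) else t) = t1 from rfl,
      show (if m = 0 then b else a) = x from rfl]
    obtain ⟨d1, he1⟩ := ih t1 x (d + 1) ((idx, d) :: stack) res (2 * r2.2.length + k + 1) hlen1 hsx
    rw [he1]
    have hlen2 : r1.1.length = n := by rw [hsim2.1, hlen1]
    have hrow1 : t1.getD i [] = x :: y :: rest := by
      rw [ht1, hx, hy]; split
      · exact getD_set_self t i hi _
      · exact hrow
    have hrowr1 : r1.1.getD i [] = x :: y :: rest := by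
      rcases hxc with h | h
      · have he : r1 = (t1, []) := by rw [hr1, h, goB_neg_one]
        rw [he]; simpa using hrow1
      · rw [hfr1 i (by omega)]; exact hrow1
    rw [loopA_pop q _ r1.1 stack idx d d1 (res ++ r1.2) h1 (by omega) x y rest hrowr1]
    have hsy2 : SubF f r1.1 y := SubF_TSim f t1 r1.1 y hsim2 hsy
    obtain ⟨d2, he2⟩ := ih r1.1 y (d + 1) stack (res ++ r1.2 ++ [idx]) k hlen2 hsy2
    rw [he2]
    exact ⟨d2, by simp [hr2]⟩
lemma reachAux_step (t : List (List Int)) (k : Nat) :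
    reachAux t k ⊆ reachAux t (k + 1) := by
  intro i hi
  rw [reachAux]
  split
  · simp [hi]
  · exact hi

lemma reachAux_mono (t : List (List Int)) {j k : Nat} (h : j ≤ k) :
    reachAux t j ⊆ reachAux t k := by
  induction k with
  | zero => rw [Nat.le_zero.mp h]; exact fun i hi => hi
  | succ k ih =>
    rcases Nat.lt_or_ge j (k + 1) with h' | h'
    · exact fun i hi => reachAux_step t k (ih (by omega) hi)
    · rw [show j = k + 1 from by omega]; exact fun i hi => hi

lemma mem_kids (t : List (List Int)) (k : Nat) (c : Int) (hc : c ∈ (t.getD k []).take 2)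
    (h1 : 1 ≤ c) (h2 : c ≤ (t.length : Int)) : (c - 1).toNat ∈ kids t k := by
  simp only [kids, List.mem_filterMap]
  exact ⟨c, hc, by rw [if_pos ⟨h1, h2⟩]⟩

lemma reach_early (t : List (List Int)) (hne : t ≠ [])
    (h : ∀ i ∈ reach t, RowOK t.length i (t.getD i [])) :
    ∀ k, k ≤ t.length → ∀ i ∈ reachAux t k, i ∈ reachAux t i ∧ i < t.length := by
  intro k
  induction k with
  | zero =>
    intro _ i hi
    simp only [reachAux, List.mem_singleton] at hi
    subst hi
    exact ⟨by simp [reachAux], List.length_pos_of_ne_nil hne⟩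
  | succ k ih =>
    intro hk i hi
    rw [reachAux] at hi
    split at hi
    case isTrue hmem =>
      rcases List.mem_append.mp hi with hi' | hi'
      · exact ih (by omega) i hi'
      · -- i was added as a child of row k: under h it is a strictly larger index
        have hkr : k ∈ reach t := reachAux_mono t (show k ≤ t.length by omega) hmem
        obtain ⟨_, hrowok⟩ := h k hkr
        simp only [kids, List.mem_filterMap] at hi'
        obtain ⟨c, hcm, hcs⟩ := hi'
        split at hcs
        case isFalse => exact absurd hcs (by simp)
        case isTrue hcond =>
          have hci := Option.some.inj hcs
          rcases hrowok c hcm with h' | ⟨h', h''⟩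
          · omega
          · have hik : k + 1 ≤ i := by omega
            have hin : i < t.length := by omega
            have : i ∈ reachAux t (k + 1) := by
              rw [reachAux, if_pos hmem]
              exact List.mem_append.mpr (Or.inr (by rw [← hci]; exact mem_kids t k c hcm (by omega) h''))
            exact ⟨reachAux_mono t hik this, hin⟩
    case isFalse => exact ih (by omega) i hi

lemma reach_closed (t : List (List Int)) (hne : t ≠ [])
    (h : ∀ i ∈ reach t, RowOK t.length i (t.getD i [])) :
    ∀ i ∈ reach t, ∀ c ∈ (t.getD i []).take 2, 1 ≤ c → (c - 1).toNat ∈ reach t := by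
  intro i hi c hc hc1
  obtain ⟨hii, hin⟩ := reach_early t hne h t.length (le_refl _) i hi
  obtain ⟨_, hrowok⟩ := h i hi
  rcases hrowok c hc with h' | ⟨h', h''⟩
  · omega
  have : (c - 1).toNat ∈ reachAux t (i + 1) := by
    rw [reachAux, if_pos hii]
    exact List.mem_append.mpr (Or.inr (mem_kids t i c hc (by omega) h''))
  exact reachAux_mono t (by omega) this

-- every reachable well-formed node roots a well-formed forward subtree
lemma pre_SubF (t : List (List Int)) (hne : t ≠ [])
    (h : ∀ i ∈ reach t, RowOK t.length i (t.getD i [])) :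
    ∀ (f : Nat) (idx : Int),
      (idx = -1 ∨ (1 ≤ idx ∧ idx ≤ (t.length : Int) ∧ (idx - 1).toNat ∈ reach t ∧
        t.length + 1 ≤ f + idx.toNat)) → SubF f t idx := by
  intro f
  induction f with
  | zero =>
    intro idx hidx
    rcases hidx with h' | ⟨h1, h2, _, hf⟩
    · exact h'
    · exfalso; omega
  | succ f ih =>
    intro idx hidx
    rcases hidx with h' | ⟨h1, h2, hr, hf⟩
    · exact Or.inl h'
    right
    refine ⟨h1, h2, ?_⟩
    obtain ⟨hl2, hrowok⟩ := h _ hr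
    rcases hrl : t.getD (idx - 1).toNat [] with _ | ⟨a, _ | ⟨b, rest⟩⟩
    · rw [hrl] at hl2; simp at hl2
    · rw [hrl] at hl2; simp at hl2
    rw [hrl] at hrowok
    have hcast : (((idx - 1).toNat : Nat) : Int) = idx - 1 := by omega
    have hchild : ∀ c, c ∈ [a, b] → SubF f t c ∧ (c = -1 ∨ idx < c) := by
      intro c hcm
      have hcm' : c ∈ (a :: b :: rest).take 2 := by simpa using hcm
      rcases hrowok c hcm' with h' | ⟨h', h''⟩
      · exact ⟨ih c (Or.inl h'), Or.inl h'⟩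
      refine ⟨ih c (Or.inr ⟨by omega, h'', ?_, by omega⟩), Or.inr (by omega)⟩
      have := reach_closed t hne h _ hr c (by rw [hrl]; simpa using hcm) (by omega)
      exact this
    exact ⟨a, b, rest, rfl, (hchild a (by simp)).2, (hchild b (by simp)).2,
      (hchild a (by simp)).1, (hchild b (by simp)).1⟩
-- ===== VERDICT (by name: the statement is the Claim_ definition above) =====
theorem iter_walk2_spec : Claim_equal_iter_walk2 := by
  intro tree q _ hpre
  obtain ⟨hq, hne, hrows⟩ := hpre
  unfold Spec_iter_walk2 iter_walk2 iter_walk2_alt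
  set n := tree.length with hn
  have hn1 : 0 < n := List.length_pos_of_ne_nil hne
  have hroot : (0 : Nat) ∈ reach tree := by
    refine reachAux_mono tree (Nat.zero_le n) ?_
    simp [reachAux]
  have hsub : SubF (n + 2) tree 1 := by
    refine pre_SubF tree hne hrows (n + 2) 1 (Or.inr ⟨le_refl _, by exact_mod_cast hn1, ?_, by omega⟩)
    simpa using hroot
  obtain ⟨_, _, hbound⟩ := goB_props q n (n + 2) tree 1 1 rfl hsub
  set r := goB q (n + 2) tree 1 1 with hr
  rw [Int.toNat_one, show n + 2 - 1 = n + 1 from by omega] at hbound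
  have hp : 2 ^ (n + 2) = 2 * 2 ^ (n + 1) := by
    rw [show n + 2 = (n + 1) + 1 from rfl, pow_succ, Nat.mul_comm]
  obtain ⟨d', hsim⟩ := loopA_goB q n hq (n + 2) tree 1 1 [] []
    (2 ^ (n + 2) - 2 * r.2.length) rfl hsub
  rw [show 2 * r.2.length + (2 ^ (n + 2) - 2 * r.2.length) = 2 ^ (n + 2) from by omega] at hsim
  rw [hsim, show 2 ^ (n + 2) - 2 * r.2.length = (2 ^ (n + 2) - 2 * r.2.length - 1) + 1 from by omega,
    loopA_exit]
  exact List.nil_append _
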